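-- pv_equiv track=rewrite | github.com/Jeta52/KosovoElectionSentiment2025 | 03_preprocess_final_comments_dataset.py | most_frequent_annotation
-- ===== SOURCE A (Python) =====
-- def most_frequent_annotation(row):
--     annotations = [row["Annot 1"], row["Annot 2"], row["Annot 3"]]
--     counts = {ann: annotations.count(ann) for ann in set(annotations)}  # Count occurrences
--
--     # Find the maximum occurrence
--     max_occurrences = max(counts.values())
--     most_common = [k for k, v in counts.items() if v == max_occurrences]
--
--     if len(most_common) == 1:
--         return most_common[0]  # If one clear most common value, return it
--
--     return 0  # In case of a tie, return 0 (neutral)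
-- ===== SOURCE B (Python) =====
-- def most_frequent_annotation(row):
--     a = row["Annot 1"]
--     b = row["Annot 2"]
--     c = row["Annot 3"]
--     if a == b or a == c:
--         return a
--     if b == c:
--         return b
--     return 0
-- ===== Notes on version B (the rewrite author's own statement) =====
-- stated objective: simpler
-- what changed: Replaces the set/count-dict/max/filter machinery with three pairwise equality tests on the unpacked annotations (majority of three by direct comparison, tie of three distinct values -> 0).
import Mathlib
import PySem

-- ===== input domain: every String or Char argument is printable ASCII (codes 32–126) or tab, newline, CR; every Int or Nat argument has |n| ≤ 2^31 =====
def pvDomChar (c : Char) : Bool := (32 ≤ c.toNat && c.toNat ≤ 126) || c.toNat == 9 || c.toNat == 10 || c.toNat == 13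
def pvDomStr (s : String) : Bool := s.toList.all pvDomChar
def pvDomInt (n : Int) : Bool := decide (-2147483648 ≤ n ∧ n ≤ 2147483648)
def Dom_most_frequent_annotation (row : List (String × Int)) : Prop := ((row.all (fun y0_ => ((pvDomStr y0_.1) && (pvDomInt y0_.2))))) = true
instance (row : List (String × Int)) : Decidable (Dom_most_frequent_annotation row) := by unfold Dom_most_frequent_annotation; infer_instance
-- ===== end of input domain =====

-- B replaces A's set/count-dict/max/filter pipeline by three pairwise equality tests (simpler decomposition, same values).

-- ===== PORT A =====
-- dict[str,int] as assoc list: row[k] is the first match (KeyError = none)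
def pyLookupA (row : List (String × Int)) (k : String) : Option Int :=
  (row.find? (fun p => p.1 == k)).map (·.2)

-- core of A on the three looked-up annotations (the [row[...] for ...] list onward)
def mfaCoreA (x y z : Int) : Int :=
  let annotations : List Int := [x, y, z]
  let counts : PySem.Dict Int Int :=
    (PySem.Set.ofList annotations).foldl
      (fun d ann => d.insert ann (PySem.List.count annotations ann)) PySem.Dict.empty
  let max_occurrences : Int := (PySem.List.max? counts.values (fun v => v)).getD 0
  let most_common : List Int := (counts.items.filter (fun p => p.2 == max_occurrences)).map (·.1)
  if most_common.length == 1 then most_common.getD 0 0 else 0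

def most_frequent_annotation (row : List (String × Int)) : Int :=
  match pyLookupA row "Annot 1", pyLookupA row "Annot 2", pyLookupA row "Annot 3" with
  | some x, some y, some z => mfaCoreA x y z
  | _, _, _ => 0   -- KeyError in Python; excluded by Pre_

-- ===== PORT B =====
def pyLookupB (row : List (String × Int)) (k : String) : Option Int :=
  (row.find? (fun p => p.1 == k)).map (·.2)

def most_frequent_annotation_alt (row : List (String × Int)) : Int :=
  -- KeyError in Python on a missing key (excluded by Pre_): the bind chain yields the default 0 there
  ((pyLookupB row "Annot 1").bind fun a =>
    (pyLookupB row "Annot 2").bind fun b =>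
      (pyLookupB row "Annot 3").map fun c =>
        if a = b ∨ a = c then a else if b = c then b else 0).getD 0

-- ===== PRECONDITION & SPEC =====
-- Pre_ excludes exactly the rows missing one of the keys "Annot 1/2/3", on which A raises KeyError.
def Pre_most_frequent_annotation (row : List (String × Int)) : Prop :=
  "Annot 1" ∈ row.map (·.1) ∧ "Annot 2" ∈ row.map (·.1) ∧ "Annot 3" ∈ row.map (·.1)
instance (row : List (String × Int)) : Decidable (Pre_most_frequent_annotation row) := by
  unfold Pre_most_frequent_annotation; infer_instance
def pvWitness_most_frequent_annotation : (List (String × Int)) :=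
  [("Annot 1", 1), ("Annot 2", 0), ("Annot 3", 1)]

def Spec_most_frequent_annotation (row : List (String × Int)) (out : Int) : Prop := out = most_frequent_annotation_alt row
instance (row : List (String × Int)) (out : Int) : Decidable (Spec_most_frequent_annotation row out) := by unfold Spec_most_frequent_annotation; infer_instance

-- ===== CLAIM (what is proved, stated in full; the proofs are below) =====
def Claim_equal_most_frequent_annotation : Prop := ∀ (row : List (String × Int)), Dom_most_frequent_annotation row → Pre_most_frequent_annotation row → Spec_most_frequent_annotation row (most_frequent_annotation row)

-- ===== LEMMAS AND PROOFS =====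

-- the two cores agree on any three annotations
theorem mfaCore_eq (x y z : Int) :
    mfaCoreA x y z = (if x = y ∨ x = z then x else if y = z then y else 0) := by
  unfold mfaCoreA
  by_cases hxy : x = y
  · subst hxy
    by_cases hyz : x = z
    · subst hyz
      simp [PySem.Set.ofList, PySem.Set.add, PySem.List.count, PySem.Dict.insert,
        PySem.Dict.empty, PySem.Dict.values, PySem.List.max?, List.count, List.countP,
        List.countP.go, Bool.cond_eq_ite, beq_iff_eq]
    · simp [PySem.Set.ofList, PySem.Set.add, PySem.List.count, PySem.Dict.insert,
        PySem.Dict.empty, PySem.Dict.values, PySem.List.max?, List.count, List.countP,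
        List.countP.go, Bool.cond_eq_ite, beq_iff_eq, hyz, Ne.symm hyz]
  · by_cases hxz : x = z
    · subst hxz
      simp [PySem.Set.ofList, PySem.Set.add, PySem.List.count, PySem.Dict.insert,
        PySem.Dict.empty, PySem.Dict.values, PySem.List.max?, List.count, List.countP,
        List.countP.go, Bool.cond_eq_ite, beq_iff_eq, hxy, Ne.symm hxy]
    · by_cases hyz : y = z
      · subst hyz
        simp [PySem.Set.ofList, PySem.Set.add, PySem.List.count, PySem.Dict.insert,
          PySem.Dict.empty, PySem.Dict.values, PySem.List.max?, List.count, List.countP,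
          List.countP.go, Bool.cond_eq_ite, beq_iff_eq, hxy, Ne.symm hxy]
      · simp [PySem.Set.ofList, PySem.Set.add, PySem.List.count, PySem.Dict.insert,
          PySem.Dict.empty, PySem.Dict.values, PySem.List.max?, List.count, List.countP,
          List.countP.go, Bool.cond_eq_ite, beq_iff_eq, hxy, hxz, hyz, Ne.symm hxy, Ne.symm hxz, Ne.symm hyz]

-- a key occurring in the row makes the first-match lookup succeed
theorem pyLookupA_isSome (row : List (String × Int)) (k : String)
    (hk : k ∈ row.map (·.1)) : ∃ v, pyLookupA row k = some v := by
  simp only [List.mem_map] at hk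
  obtain ⟨p, hp, hpk⟩ := hk
  have hs : (row.find? (fun q => q.1 == k)).isSome :=
    List.find?_isSome.mpr ⟨p, hp, by simp [hpk]⟩
  obtain ⟨q, hq⟩ := Option.isSome_iff_exists.mp hs
  exact ⟨q.2, by simp [pyLookupA, hq]⟩

-- ===== VERDICT (by name: the statement is the Claim_ definition above) =====
theorem most_frequent_annotation_spec : Claim_equal_most_frequent_annotation := by
  intro row _ hpre
  obtain ⟨h1, h2, h3⟩ := hpre
  obtain ⟨x, hx⟩ := pyLookupA_isSome row _ h1
  obtain ⟨y, hy⟩ := pyLookupA_isSome row _ h2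
  obtain ⟨z, hz⟩ := pyLookupA_isSome row _ h3
  have hBA : pyLookupB = pyLookupA := rfl
  show most_frequent_annotation row = most_frequent_annotation_alt row
  simp only [most_frequent_annotation, most_frequent_annotation_alt, hBA, hx, hy, hz]
  exact mfaCore_eq x y z
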